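-- pv_equiv track=rewrite | github.com/gyasifred/clinorchestra | mimic-iv/scripts/gather_clinical_guidelines.py | _get_recommended_sources_for_diagnosis
-- ===== SOURCE A (Python) =====
-- def _get_recommended_sources_for_diagnosis(diagnosis_name: str):
--     """Get recommended guideline sources based on diagnosis category"""
--
--     # This is a simplified categorization - you may want to make it more sophisticated
--     diagnosis_lower = diagnosis_name.lower()
--
--     recommendations = []
--
--     if any(word in diagnosis_lower for word in ['heart', 'cardiac', 'myocardial', 'coronary']):
--         recommendations.extend([
--             "American Heart Association (AHA) - https://www.heart.org/",
--             "American College of Cardiology (ACC) - https://www.acc.org/",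
--             "European Society of Cardiology - https://www.escardio.org/"
--         ])
--
--     if any(word in diagnosis_lower for word in ['pneumonia', 'respiratory', 'copd', 'asthma', 'lung']):
--         recommendations.extend([
--             "American Thoracic Society - https://www.thoracic.org/",
--             "European Respiratory Society - https://www.ersnet.org/"
--         ])
--
--     if any(word in diagnosis_lower for word in ['sepsis', 'infection', 'pneumonia']):
--         recommendations.extend([
--             "Infectious Diseases Society of America - https://www.idsociety.org/",
--             "Surviving Sepsis Campaign - https://www.sccm.org/SurvivingSepsisCampaign/"
--         ])
--
--     if any(word in diagnosis_lower for word in ['kidney', 'renal', 'dialysis']):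
--         recommendations.extend([
--             "KDIGO - https://kdigo.org/",
--             "National Kidney Foundation - https://www.kidney.org/"
--         ])
--
--     if any(word in diagnosis_lower for word in ['stroke', 'cerebral', 'brain']):
--         recommendations.extend([
--             "American Stroke Association - https://www.stroke.org/",
--             "American Academy of Neurology - https://www.aan.com/"
--         ])
--
--     # Always include general sources
--     recommendations.extend([
--         "UpToDate - https://www.uptodate.com/",
--         "BMJ Best Practice - https://bestpractice.bmj.com/",
--         "PubMed - https://pubmed.ncbi.nlm.nih.gov/"
--     ])
--
--     return recommendations
-- ===== SOURCE B (Python) =====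
-- # Inverted index: keyword -> category ids; each keyword (incl. 'pneumonia') is tested once,
-- # matches are recorded in a flags array, then sources are emitted category by category.
-- _KEYWORD_CATEGORIES = {
--     'heart': (0,), 'cardiac': (0,), 'myocardial': (0,), 'coronary': (0,),
--     'pneumonia': (1, 2), 'respiratory': (1,), 'copd': (1,), 'asthma': (1,), 'lung': (1,),
--     'sepsis': (2,), 'infection': (2,),
--     'kidney': (3,), 'renal': (3,), 'dialysis': (3,),
--     'stroke': (4,), 'cerebral': (4,), 'brain': (4,),
-- }
--
-- _CATEGORY_SOURCES = [
--     ["American Heart Association (AHA) - https://www.heart.org/",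
--      "American College of Cardiology (ACC) - https://www.acc.org/",
--      "European Society of Cardiology - https://www.escardio.org/"],
--     ["American Thoracic Society - https://www.thoracic.org/",
--      "European Respiratory Society - https://www.ersnet.org/"],
--     ["Infectious Diseases Society of America - https://www.idsociety.org/",
--      "Surviving Sepsis Campaign - https://www.sccm.org/SurvivingSepsisCampaign/"],
--     ["KDIGO - https://kdigo.org/",
--      "National Kidney Foundation - https://www.kidney.org/"],
--     ["American Stroke Association - https://www.stroke.org/",
--      "American Academy of Neurology - https://www.aan.com/"],
-- ]
--
-- _GENERAL_SOURCES = [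
--     "UpToDate - https://www.uptodate.com/",
--     "BMJ Best Practice - https://bestpractice.bmj.com/",
--     "PubMed - https://pubmed.ncbi.nlm.nih.gov/",
-- ]
--
--
-- def _get_recommended_sources_for_diagnosis(diagnosis_name: str):
--     text = diagnosis_name.lower()
--     matched = [False] * 5
--     for keyword, cats in _KEYWORD_CATEGORIES.items():
--         if keyword in text:
--             for c in cats:
--                 matched[c] = True
--     out = []
--     for c in range(5):
--         if matched[c]:
--             out += _CATEGORY_SOURCES[c]
--     return out + _GENERAL_SOURCES
-- ===== Notes on version B (the rewrite author's own statement) =====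
-- stated objective: alternative
-- what changed: Replaces A's category-major if-blocks by an inverted index keyword->category-ids scanned once (the shared keyword 'pneumonia' is tested a single time and marks two categories in a flags array), with the output then assembled in a separate pass over the five categories.
import Mathlib
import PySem

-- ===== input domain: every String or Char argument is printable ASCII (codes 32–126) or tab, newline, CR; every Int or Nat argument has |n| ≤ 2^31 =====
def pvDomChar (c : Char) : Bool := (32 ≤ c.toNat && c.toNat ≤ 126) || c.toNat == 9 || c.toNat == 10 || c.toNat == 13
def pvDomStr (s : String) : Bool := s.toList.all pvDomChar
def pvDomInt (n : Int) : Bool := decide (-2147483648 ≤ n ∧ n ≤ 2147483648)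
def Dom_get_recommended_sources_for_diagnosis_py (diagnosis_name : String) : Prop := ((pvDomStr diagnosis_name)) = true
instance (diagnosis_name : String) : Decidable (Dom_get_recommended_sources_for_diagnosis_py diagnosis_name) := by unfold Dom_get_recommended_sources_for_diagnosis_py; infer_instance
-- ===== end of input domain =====

-- B replaces A's category-major if-blocks by an inverted keyword->categories index scanned once into a flags list, then a separate emit pass (objective: alternative).


-- ===== PORT A =====
-- Literal port of A: five independent if-blocks extending the list, then the general sources.
def get_recommended_sources_for_diagnosis_py (diagnosis_name : String) : List String :=
  let diagnosis_lower := PySem.Str.lower diagnosis_name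
  let recommendations : List String := []
  let recommendations :=
    if ["heart", "cardiac", "myocardial", "coronary"].any
        (fun word => PySem.Str.isIn word diagnosis_lower) then
      recommendations ++
        ["American Heart Association (AHA) - https://www.heart.org/",
         "American College of Cardiology (ACC) - https://www.acc.org/",
         "European Society of Cardiology - https://www.escardio.org/"]
    else recommendations
  let recommendations :=
    if ["pneumonia", "respiratory", "copd", "asthma", "lung"].any
        (fun word => PySem.Str.isIn word diagnosis_lower) then
      recommendations ++
        ["American Thoracic Society - https://www.thoracic.org/",
         "European Respiratory Society - https://www.ersnet.org/"]
    else recommendations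
  let recommendations :=
    if ["sepsis", "infection", "pneumonia"].any
        (fun word => PySem.Str.isIn word diagnosis_lower) then
      recommendations ++
        ["Infectious Diseases Society of America - https://www.idsociety.org/",
         "Surviving Sepsis Campaign - https://www.sccm.org/SurvivingSepsisCampaign/"]
    else recommendations
  let recommendations :=
    if ["kidney", "renal", "dialysis"].any
        (fun word => PySem.Str.isIn word diagnosis_lower) then
      recommendations ++
        ["KDIGO - https://kdigo.org/",
         "National Kidney Foundation - https://www.kidney.org/"]
    else recommendations
  let recommendations :=
    if ["stroke", "cerebral", "brain"].any
        (fun word => PySem.Str.isIn word diagnosis_lower) then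
      recommendations ++
        ["American Stroke Association - https://www.stroke.org/",
         "American Academy of Neurology - https://www.aan.com/"]
    else recommendations
  recommendations ++
    ["UpToDate - https://www.uptodate.com/",
     "BMJ Best Practice - https://bestpractice.bmj.com/",
     "PubMed - https://pubmed.ncbi.nlm.nih.gov/"]

-- ===== PORT B =====
-- B: inverted index keyword -> category ids (each keyword appears once); one scan marks a flags
-- list, a second pass emits the sources of the marked categories, then the general constant.
def pvKeywordCategories : List (String × List Nat) :=
  [("heart", [0]), ("cardiac", [0]), ("myocardial", [0]), ("coronary", [0]),
   ("pneumonia", [1, 2]), ("respiratory", [1]), ("copd", [1]), ("asthma", [1]), ("lung", [1]),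
   ("sepsis", [2]), ("infection", [2]),
   ("kidney", [3]), ("renal", [3]), ("dialysis", [3]),
   ("stroke", [4]), ("cerebral", [4]), ("brain", [4])]

def pvCategorySources : List (List String) :=
  [["American Heart Association (AHA) - https://www.heart.org/",
    "American College of Cardiology (ACC) - https://www.acc.org/",
    "European Society of Cardiology - https://www.escardio.org/"],
   ["American Thoracic Society - https://www.thoracic.org/",
    "European Respiratory Society - https://www.ersnet.org/"],
   ["Infectious Diseases Society of America - https://www.idsociety.org/",
    "Surviving Sepsis Campaign - https://www.sccm.org/SurvivingSepsisCampaign/"],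
   ["KDIGO - https://kdigo.org/",
    "National Kidney Foundation - https://www.kidney.org/"],
   ["American Stroke Association - https://www.stroke.org/",
    "American Academy of Neurology - https://www.aan.com/"]]

def pvGeneralSources : List String :=
  ["UpToDate - https://www.uptodate.com/",
   "BMJ Best Practice - https://bestpractice.bmj.com/",
   "PubMed - https://pubmed.ncbi.nlm.nih.gov/"]

def get_recommended_sources_for_diagnosis_py_alt (diagnosis_name : String) : List String :=
  let text := PySem.Str.lower diagnosis_name
  let matched : List Bool := List.replicate 5 false
  let matched := pvKeywordCategories.foldl
    (fun m kc => if PySem.Str.isIn kc.1 text then kc.2.foldl (fun m2 c => m2.set c true) m else m)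
    matched
  let out := (PySem.List.pyRange 0 5 1).foldl
    (fun out c => if matched.getD c.toNat false then out ++ pvCategorySources.getD c.toNat [] else out)
    []
  out ++ pvGeneralSources

-- ===== PRECONDITION & SPEC =====
def Spec_get_recommended_sources_for_diagnosis_py (diagnosis_name : String) (out : List String) : Prop := out = get_recommended_sources_for_diagnosis_py_alt diagnosis_name
instance (diagnosis_name : String) (out : List String) : Decidable (Spec_get_recommended_sources_for_diagnosis_py diagnosis_name out) := by unfold Spec_get_recommended_sources_for_diagnosis_py; infer_instance

-- ===== CLAIM (what is proved, stated in full; the proofs are below) =====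
def Claim_equal_get_recommended_sources_for_diagnosis_py : Prop := ∀ (diagnosis_name : String), Dom_get_recommended_sources_for_diagnosis_py diagnosis_name → Spec_get_recommended_sources_for_diagnosis_py diagnosis_name (get_recommended_sources_for_diagnosis_py diagnosis_name)

-- ===== LEMMAS AND PROOFS =====
-- getD after a single in-place mark
theorem pvSet_getD (m : List Bool) (c j : Nat) :
    (m.set c true).getD j false = ((decide (c = j) && decide (j < m.length)) || m.getD j false) := by
  simp only [List.getD, List.getElem?_set]
  by_cases hc : c = j
  · subst hc
    by_cases hl : c < m.length <;> simp [hl]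
  · simp [hc]

-- length is preserved by the inner marking fold
theorem pvLen_inner (cats : List Nat) (m : List Bool) :
    (cats.foldl (fun m2 c => m2.set c true) m).length = m.length := by
  induction cats generalizing m with
  | nil => rfl
  | cons c cs ih => simp [List.foldl_cons, ih, List.length_set]

-- getD of the inner marking fold
theorem pvInner_getD (cats : List Nat) (m : List Bool) (j : Nat) :
    (cats.foldl (fun m2 c => m2.set c true) m).getD j false
      = (cats.any (fun c => decide (c = j) && decide (j < m.length)) || m.getD j false) := by
  induction cats generalizing m with
  | nil => simp
  | cons c cs ih =>
      simp only [List.foldl_cons, List.any_cons, ih, List.length_set, pvSet_getD]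
      cases h1 : decide (c = j) && decide (j < m.length) <;>
        cases h2 : cs.any (fun c => decide (c = j) && decide (j < m.length)) <;> simp

-- getD of the keyword scan = any over the inverted index
theorem pvScan_getD (t : String) (rows : List (String × List Nat)) (m : List Bool) (j : Nat) :
    (rows.foldl (fun m kc => if PySem.Str.isIn kc.1 t then kc.2.foldl (fun m2 c => m2.set c true) m else m) m).getD j false
      = (rows.any (fun kc => PySem.Str.isIn kc.1 t && kc.2.any (fun c => decide (c = j) && decide (j < m.length))) || m.getD j false) := by
  induction rows generalizing m with
  | nil => simp
  | cons kc rest ih =>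
      simp only [List.foldl_cons, List.any_cons]
      by_cases h : PySem.Str.isIn kc.1 t
      · rw [if_pos h, ih, pvLen_inner, pvInner_getD, h]
        cases h1 : kc.2.any (fun c => decide (c = j) && decide (j < m.length)) <;>
          cases h2 : rest.any (fun kc => PySem.Str.isIn kc.1 t && kc.2.any (fun c => decide (c = j) && decide (j < m.length))) <;>
          simp
      · have hb : PySem.Str.isIn kc.1 t = false := by simpa using h
        rw [if_neg h, ih, hb]
        simp

-- ===== VERDICT (by name: the statement is the Claim_ definition above) =====
theorem get_recommended_sources_for_diagnosis_py_spec : Claim_equal_get_recommended_sources_for_diagnosis_py := by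
  intro d _
  unfold Spec_get_recommended_sources_for_diagnosis_py
  unfold get_recommended_sources_for_diagnosis_py get_recommended_sources_for_diagnosis_py_alt
  have hr : PySem.List.pyRange 0 5 1 = [0, 1, 2, 3, 4] := by decide
  simp only [hr, List.foldl_cons, List.foldl_nil]
  rw [pvScan_getD, pvScan_getD, pvScan_getD, pvScan_getD, pvScan_getD]
  simp only [pvKeywordCategories, pvCategorySources, pvGeneralSources,
    List.any_cons, List.any_nil, List.length_replicate,
    Int.toNat_zero, Int.toNat_one]
  simp only [List.getD, List.getElem?_replicate]
  simp
  split_ifs <;> simp_all
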